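-- pv_equiv track=rewrite | github.com/c940606/leetcode | 笔试/最大高度.py | max_height2
-- ===== SOURCE A (Python) =====
-- def max_height2(heights):
--     res = 0
--     now = 0
--     queue = []
--     for i, height in enumerate(heights):
--         if not queue or queue[-1][0] > height:
--             queue.append([height, i])
--         else:
--             while now + 1 < len(queue) and i - queue[now + 1][1] > res:
--                 now += 1
--             while now - 1 >= 0 and height >= queue[now - 1][0]:
--                 now -= 1
--             if height >= queue[now][0]:
--                 res = i - queue[now][1]
--     return res
-- ===== SOURCE B (Python) =====
-- def max_height2(heights):
--     n = len(heights)
--     res = 0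
--     for i in range(n):
--         for j in range(i, n):
--             if heights[i] <= heights[j]:
--                 res = max(res, j - i)
--     return res
-- ===== Notes on version B (the rewrite author's own statement) =====
-- stated objective: simpler
-- what changed: Replaced A's single-pass decreasing-stack scan with a persistent pointer by a direct two-nested-loop maximum over all index pairs (i,j) with heights[i] <= heights[j]; B is much shorter and obviously correct but quadratic, so slower on large inputs.
import Mathlib
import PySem

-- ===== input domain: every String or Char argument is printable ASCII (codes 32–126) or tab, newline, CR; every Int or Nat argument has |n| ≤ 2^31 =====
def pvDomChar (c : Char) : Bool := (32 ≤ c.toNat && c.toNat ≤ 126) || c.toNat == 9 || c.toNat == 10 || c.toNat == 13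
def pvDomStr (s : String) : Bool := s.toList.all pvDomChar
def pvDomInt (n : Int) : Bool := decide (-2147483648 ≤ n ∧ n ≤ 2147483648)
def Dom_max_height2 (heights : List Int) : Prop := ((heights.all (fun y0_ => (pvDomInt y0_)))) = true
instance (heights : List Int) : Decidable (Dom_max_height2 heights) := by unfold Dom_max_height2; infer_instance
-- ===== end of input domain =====

-- B changes the algorithm: a plain quadratic maximum over all pairs instead of A's
-- pointer-on-a-decreasing-stack scan; objective: simpler (not faster).

-- ===== PORT A =====
-- queue entries are (height, index); `now` is A's persistent pointer (a Nat: it is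
-- only ever 0 ≤ now < len(queue) in Python too).
-- while now + 1 < len(queue) and i - queue[now + 1][1] > res: now += 1
def fwdLoop (res i : Int) (queue : List (Int × Nat)) (now : Nat) : Nat :=
  if h : now + 1 < queue.length ∧ i - ((queue.getD (now + 1) (0, 0)).2 : Int) > res then
    fwdLoop res i queue (now + 1)
  else now
termination_by queue.length - now
decreasing_by omega

-- while now - 1 >= 0 and height >= queue[now - 1][0]: now -= 1
def bwdLoop (height : Int) (queue : List (Int × Nat)) : Nat → Nat
  | 0 => 0
  | n + 1 => if height ≥ (queue.getD n (0, 0)).1 then bwdLoop height queue n else n + 1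

-- the body of A's `for i, height in enumerate(heights)` loop
def stepA (st : Int × Nat × List (Int × Nat)) (i : Nat) (height : Int) :
    Int × Nat × List (Int × Nat) :=
  let res := st.1; let now := st.2.1; let queue := st.2.2
  if queue = [] ∨ (queue.getLastD (0, 0)).1 > height then
    (res, now, queue ++ [(height, i)])
  else
    let n1 := fwdLoop res (i : Int) queue now
    let n2 := bwdLoop height queue n1
    if height ≥ (queue.getD n2 (0, 0)).1 then
      ((i : Int) - ((queue.getD n2 (0, 0)).2 : Int), n2, queue)
    else (res, n2, queue)

-- the enumerate-loop itself, carrying the running index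
def loopA (st : Int × Nat × List (Int × Nat)) (i : Nat) : List Int → Int × Nat × List (Int × Nat)
  | [] => st
  | x :: rest => loopA (stepA st i x) (i + 1) rest

def max_height2 (heights : List Int) : Int :=
  (loopA (0, 0, []) 0 heights).1

-- ===== PORT B =====
def max_height2_alt (heights : List Int) : Int :=
  -- n = len(heights) is inlined
  (List.range heights.length).foldl
    (fun res i =>
      (List.range' i (heights.length - i)).foldl
        (fun res j => if heights.getD i 0 ≤ heights.getD j 0 then max res ((j : Int) - (i : Int)) else res)
        res)
    0

-- ===== PRECONDITION & SPEC =====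
def Spec_max_height2 (heights : List Int) (out : Int) : Prop := out = max_height2_alt heights
instance (heights : List Int) (out : Int) : Decidable (Spec_max_height2 heights out) := by unfold Spec_max_height2; infer_instance

-- ===== CLAIM (what is proved, stated in full; the proofs are below) =====
def Claim_equal_max_height2 : Prop := ∀ (heights : List Int), Dom_max_height2 heights → Spec_max_height2 heights (max_height2 heights)

-- ===== LEMMAS AND PROOFS =====

-- `QRel`: queue entries have strictly decreasing heights and strictly increasing indices
def QRel (a b : Int × Nat) : Prop := b.1 < a.1 ∧ a.2 < b.2

def GoodPair (h : List Int) (t j : Nat) : Prop :=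
  t ≤ j ∧ j < h.length ∧ h.getD t 0 ≤ h.getD j 0

def Wspec (h : List Int) (r : Int) : Prop :=
  0 ≤ r ∧ (∀ t j, GoodPair h t j → (j : Int) - (t : Int) ≤ r) ∧
    (r = 0 ∨ ∃ t j, GoodPair h t j ∧ r = (j : Int) - (t : Int))

def QInv (p : List Int) (queue : List (Int × Nat)) : Prop :=
  queue.Pairwise QRel ∧
  (∀ e ∈ queue, e.2 < p.length ∧ p.getD e.2 0 = e.1 ∧ ∀ t, t < e.2 → e.1 < p.getD t 0) ∧
  (∀ idx, idx < p.length → (∀ t, t < idx → p.getD idx 0 < p.getD t 0) → (p.getD idx 0, idx) ∈ queue) ∧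
  (queue = [] → p = []) ∧
  (queue ≠ [] → ∀ t, t < p.length → (queue.getLastD (0,0)).1 ≤ p.getD t 0)

def AInv (p : List Int) (st : Int × Nat × List (Int × Nat)) : Prop :=
  QInv p st.2.2 ∧ (st.2.2 = [] → st.2.1 = 0) ∧ (st.2.2 ≠ [] → st.2.1 < st.2.2.length) ∧
  Wspec p st.1 ∧
  (st.2.2 ≠ [] → st.1 + (((st.2.2.getD st.2.1 (0,0)).2 : Nat) : Int) ≤ (p.length : Int))

theorem Wspec_unique {h : List Int} {r1 r2 : Int} (h1 : Wspec h r1) (h2 : Wspec h r2) : r1 = r2 := by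
  obtain ⟨n1, u1, a1⟩ := h1
  obtain ⟨n2, u2, a2⟩ := h2
  have le12 : r1 ≤ r2 := by
    rcases a1 with h0 | ⟨t, j, gp, he⟩
    · omega
    · have := u2 t j gp; omega
  have le21 : r2 ≤ r1 := by
    rcases a2 with h0 | ⟨t, j, gp, he⟩
    · omega
    · have := u1 t j gp; omega
  omega

-- ---------- generic fold lemmas ----------

theorem foldl_pres {α : Type} {Q : Int → Prop} (f : Int → α → Int) (l : List α) (r : Int)
    (h0 : Q r) (hs : ∀ r x, x ∈ l → Q r → Q (f r x)) : Q (l.foldl f r) := by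
  induction l generalizing r with
  | nil => exact h0
  | cons a t ih =>
      exact ih (f r a) (hs r a (by simp) h0) (fun r x hx => hs r x (by simp [hx]))

-- ---------- B : max_height2_alt satisfies Wspec ----------

theorem inner_ge_init (h : List Int) (i : Nat) (l : List Nat) (res : Int) :
    res ≤ l.foldl (fun res j => if h.getD i 0 ≤ h.getD j 0 then max res ((j : Int) - (i : Int)) else res) res := by
  induction l generalizing res with
  | nil => simp
  | cons a t ih =>
      refine le_trans ?_ (ih _)
      show res ≤ if h.getD i 0 ≤ h.getD a 0 then max res ((a : Int) - (i : Int)) else res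
      by_cases hc : h.getD i 0 ≤ h.getD a 0
      · rw [if_pos hc]; exact le_max_left _ _
      · rw [if_neg hc]

theorem inner_ge_elem (h : List Int) (i : Nat) (l : List Nat) (res : Int) (j : Nat)
    (hj : j ∈ l) (hle : h.getD i 0 ≤ h.getD j 0) :
    (j : Int) - (i : Int) ≤ l.foldl (fun res j => if h.getD i 0 ≤ h.getD j 0 then max res ((j : Int) - (i : Int)) else res) res := by
  induction l generalizing res with
  | nil => simp at hj
  | cons a t ih =>
      rcases List.mem_cons.1 hj with rfl | hj'
      · refine le_trans ?_ (inner_ge_init h i t _)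
        show (j : Int) - (i : Int) ≤ if h.getD i 0 ≤ h.getD j 0 then max res ((j : Int) - (i : Int)) else res
        rw [if_pos hle]; exact le_max_right _ _
      · exact ih _ hj'

theorem outer_ge_init (h : List Int) (n : Nat) (l : List Nat) (res : Int) :
    res ≤ l.foldl (fun res i => (List.range' i (n - i)).foldl
      (fun res j => if h.getD i 0 ≤ h.getD j 0 then max res ((j : Int) - (i : Int)) else res) res) res := by
  induction l generalizing res with
  | nil => simp
  | cons a t ih => exact le_trans (inner_ge_init h a _ res) (ih _)

theorem B_Wspec (h : List Int) : Wspec h (max_height2_alt h) := by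
  unfold max_height2_alt
  refine ⟨outer_ge_init h h.length (List.range h.length) 0, ?_, ?_⟩
  · intro t j gp
    obtain ⟨htj, hj, hle⟩ := gp
    have ht : t < h.length := lt_of_le_of_lt htj hj
    obtain ⟨l1, l2, hsplit⟩ := List.append_of_mem (List.mem_range.2 ht)
    rw [hsplit, List.foldl_append, List.foldl_cons]
    refine le_trans ?_ (outer_ge_init h h.length l2 _)
    exact inner_ge_elem h t _ _ j (List.mem_range'_1.2 ⟨htj, by omega⟩) hle
  · refine foldl_pres (Q := fun r => r = 0 ∨ ∃ t j, GoodPair h t j ∧ r = (j : Int) - (t : Int)) _ _ _ (Or.inl rfl) ?_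
    intro r i hi hQ
    refine foldl_pres (Q := fun r => r = 0 ∨ ∃ t j, GoodPair h t j ∧ r = (j : Int) - (t : Int)) _ _ _ hQ ?_
    intro r' j hj hQ'
    by_cases hc : h.getD i 0 ≤ h.getD j 0
    · simp only [hc, if_true]
      rcases max_choice r' ((j : Int) - (i : Int)) with hmx | hmx
      · rw [hmx]; exact hQ'
      · rw [hmx]
        refine Or.inr ⟨i, j, ⟨?_, ?_, hc⟩, rfl⟩
        · exact (List.mem_range'_1.1 hj).1
        · have := (List.mem_range'_1.1 hj).2
          have := List.mem_range.1 hi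
          omega
    · rw [if_neg hc]; exact hQ'

-- ---------- properties of A's inner while loops ----------

theorem fwd_lt_len (res i : Int) (queue : List (Int × Nat)) (now : Nat)
    (h : now < queue.length) : fwdLoop res i queue now < queue.length := by
  fun_induction fwdLoop res i queue now with
  | case1 now hc ih => exact ih (by omega)
  | case2 now hc => exact h

theorem fwd_stop (res i : Int) (queue : List (Int × Nat)) (now : Nat) :
    ¬ (fwdLoop res i queue now + 1 < queue.length ∧
       i - (((queue.getD (fwdLoop res i queue now + 1) (0,0)).2 : Nat) : Int) > res) := by
  fun_induction fwdLoop res i queue now with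
  | case1 now hc ih => exact ih
  | case2 now hc => exact hc

theorem fwd_bound (res i : Int) (queue : List (Int × Nat)) (now : Nat)
    (h : res + (((queue.getD now (0,0)).2 : Nat) : Int) ≤ i) :
    res + (((queue.getD (fwdLoop res i queue now) (0,0)).2 : Nat) : Int) ≤ i := by
  fun_induction fwdLoop res i queue now with
  | case1 now hc ih => exact ih (by omega)
  | case2 now hc => exact h

theorem bwd_eq_of_ge (x : Int) (queue : List (Int × Nat)) (m n : Nat)
    (_hm : m < queue.length) (hn : n < queue.length) (hmn : m ≤ n)
    (hsuf : ∀ k, m ≤ k → k < queue.length → (queue.getD k (0,0)).1 ≤ x)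
    (hpre : ∀ k, k < m → x < (queue.getD k (0,0)).1) :
    bwdLoop x queue n = m := by
  induction n with
  | zero =>
      have hm0 : m = 0 := by omega
      simp [bwdLoop, hm0]
  | succ k ih =>
      by_cases hk : m ≤ k
      · have hklen : k < queue.length := by omega
        have hcond : x ≥ (queue.getD k (0,0)).1 := hsuf k hk hklen
        simp only [bwdLoop, if_pos hcond]
        exact ih hklen hk
      · have hm' : m = k + 1 := by omega
        have hcond : ¬ x ≥ (queue.getD k (0,0)).1 := by
          have := hpre k (by omega)
          omega
        simp only [bwdLoop, if_neg hcond]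
        omega

theorem bwd_eq_self_of_lt (x : Int) (queue : List (Int × Nat)) (m n : Nat)
    (_hm : m < queue.length) (hn : n < m)
    (hpre : ∀ k, k < m → x < (queue.getD k (0,0)).1) :
    bwdLoop x queue n = n := by
  cases n with
  | zero => rfl
  | succ k =>
      have hcond : ¬ x ≥ (queue.getD k (0,0)).1 := by
        have := hpre k (by omega)
        omega
      simp only [bwdLoop, if_neg hcond]

-- ---------- small list helpers ----------

theorem getLastD_mem {α : Type} (l : List α) (d : α) (h : l ≠ []) : l.getLastD d ∈ l := by
  induction l generalizing d with
  | nil => exact absurd rfl h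
  | cons a t ih =>
      cases t with
      | nil => simp
      | cons b u =>
          simp only [List.getLastD_cons]
          have h2 := ih b (by simp)
          simp only [List.getLastD_cons] at h2
          exact List.mem_cons_of_mem _ h2

theorem last_le_of_pairwise (queue : List (Int × Nat)) (hpw : queue.Pairwise QRel)
    {e : Int × Nat} (he : e ∈ queue) (hne : queue ≠ []) :
    (queue.getLastD (0,0)).1 ≤ e.1 := by
  induction queue with
  | nil => exact absurd rfl hne
  | cons a t ih =>
      rcases List.pairwise_cons.1 hpw with ⟨ha, hpt⟩
      rcases List.mem_cons.1 he with rfl | he'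
      · cases t with
        | nil => simp
        | cons b u =>
            have hmem : (b :: u).getLastD (0,0) ∈ b :: u := getLastD_mem _ _ (by simp)
            have h2 := ha _ hmem
            simp only [List.getLastD_cons] at h2 ⊢
            exact le_of_lt h2.1
      · cases t with
        | nil => simp at he'
        | cons b u =>
            have h2 := ih hpt he' (by simp)
            simp only [List.getLastD_cons] at h2 ⊢
            exact h2

-- ---------- more small helpers ----------

theorem getD_append_lt {α : Type} (l l2 : List α) (d : α) (t : Nat) (h : t < l.length) :
    (l ++ l2).getD t d = l.getD t d := by
  rw [List.getD_eq_getElem _ _ (by simp; omega), List.getD_eq_getElem _ _ h]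
  exact List.getElem_append_left h

theorem getD_append_len {α : Type} (l : List α) (x d : α) : (l ++ [x]).getD l.length d = x := by
  rw [List.getD_eq_getElem _ _ (by simp)]
  simp

theorem getD_mem {α : Type} (l : List α) (d : α) (k : Nat) (h : k < l.length) : l.getD k d ∈ l := by
  rw [List.getD_eq_getElem _ _ h]
  exact List.getElem_mem h

theorem qrel_getD (queue : List (Int × Nat)) (hpw : queue.Pairwise QRel) (a b : Nat)
    (hab : a < b) (hb : b < queue.length) :
    QRel (queue.getD a (0,0)) (queue.getD b (0,0)) := by
  rw [List.getD_eq_getElem _ _ (lt_trans hab hb), List.getD_eq_getElem _ _ hb]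
  exact List.pairwise_iff_getElem.1 hpw a b (lt_trans hab hb) hb hab

theorem getLastD_eq_getD {α : Type} (l : List α) (d : α) (h : l ≠ []) :
    l.getLastD d = l.getD (l.length - 1) d := by
  rw [List.getLastD_eq_getLast?, List.getLast?_eq_getElem?, List.getD_eq_getElem?_getD]

theorem Wspec_nil {r : Int} (h : Wspec [] r) : r = 0 := by
  rcases h.2.2 with h0 | ⟨t, j, ⟨_, hj, _⟩, _⟩
  · exact h0
  · simp at hj

-- ---------- the step preserves the invariant ----------

theorem step_inv (p : List Int) (x : Int) (res : Int) (now : Nat) (queue : List (Int × Nat))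
    (hinv : AInv p (res, now, queue)) :
    AInv (p ++ [x]) (stepA (res, now, queue) p.length x) := by
  obtain ⟨⟨hpw, hent, hcomp, hqnil, hlast⟩, hnow0, hnowlt, hW, hD⟩ := hinv
  obtain ⟨hr0, hub, hat⟩ := hW
  replace hpw : queue.Pairwise QRel := hpw
  replace hent : ∀ e ∈ queue, e.2 < p.length ∧ p.getD e.2 0 = e.1 ∧ ∀ t, t < e.2 → e.1 < p.getD t 0 := hent
  replace hcomp : ∀ idx, idx < p.length → (∀ t, t < idx → p.getD idx 0 < p.getD t 0) → (p.getD idx 0, idx) ∈ queue := hcomp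
  replace hqnil : queue = [] → p = [] := hqnil
  replace hlast : queue ≠ [] → ∀ t, t < p.length → (queue.getLastD (0,0)).1 ≤ p.getD t 0 := hlast
  replace hnow0 : queue = [] → now = 0 := hnow0
  replace hnowlt : queue ≠ [] → now < queue.length := hnowlt
  replace hD : queue ≠ [] → res + (((queue.getD now (0,0)).2 : Nat) : Int) ≤ (p.length : Int) := hD
  replace hr0 : 0 ≤ res := hr0
  replace hub : ∀ t j, GoodPair p t j → (j : Int) - (t : Int) ≤ res := hub
  replace hat : res = 0 ∨ ∃ t j, GoodPair p t j ∧ res = (j : Int) - (t : Int) := hat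
  by_cases hbr : queue = [] ∨ (queue.getLastD (0,0)).1 > x
  · -- APPEND: x is a new strict minimum (or the queue is empty): push (x, i)
    have hstep : stepA (res, now, queue) p.length x = (res, now, queue ++ [(x, p.length)]) := by
      simp only [stepA]
      rw [if_pos hbr]
    rw [hstep]
    have hq_all_gt : ∀ e ∈ queue, x < e.1 := by
      intro e he
      have hne : queue ≠ [] := by rintro rfl; simp at he
      rcases hbr with h | h
      · exact absurd h hne
      · exact lt_of_lt_of_le h (last_le_of_pairwise queue hpw he hne)
    have hp_all_gt : ∀ t, t < p.length → x < p.getD t 0 := by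
      intro t ht
      rcases hbr with h | h
      · rw [hqnil h] at ht; simp at ht
      · have hne : queue ≠ [] := by
          intro h0; rw [hqnil h0] at ht; simp at ht
        exact lt_of_lt_of_le h (hlast hne t ht)
    refine ⟨⟨?_, ?_, ?_, ?_, ?_⟩, ?_, ?_, ⟨hr0, ?_, ?_⟩, ?_⟩
    · -- pairwise
      rw [List.pairwise_append]
      refine ⟨hpw, by simp, ?_⟩
      intro a ha b hb
      simp only [List.mem_singleton] at hb
      subst hb
      exact ⟨hq_all_gt a ha, (hent a ha).1⟩
    · -- entry properties
      intro e he
      rcases List.mem_append.1 he with he' | he'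
      · obtain ⟨h1, h2, h3⟩ := hent e he'
        refine ⟨by simp; omega, ?_, ?_⟩
        · rw [getD_append_lt _ _ _ _ h1]; exact h2
        · intro t ht
          rw [getD_append_lt _ _ _ _ (by omega)]
          exact h3 t ht
      · simp only [List.mem_singleton] at he'
        subst he'
        refine ⟨by simp, by simpa using getD_append_len p x 0, ?_⟩
        intro t ht
        simp only at ht ⊢
        rw [getD_append_lt _ _ _ _ ht]
        exact hp_all_gt t ht
    · -- completeness
      intro idx hidx hcond
      rcases Nat.lt_or_ge idx p.length with hlt | hge
      · have hcond' : ∀ t, t < idx → p.getD idx 0 < p.getD t 0 := by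
          intro t ht
          have := hcond t ht
          rwa [getD_append_lt _ _ _ _ hlt, getD_append_lt _ _ _ _ (by omega)] at this
        rw [getD_append_lt _ _ _ _ hlt]
        exact List.mem_append_left _ (hcomp idx hlt hcond')
      · have hidx' : idx = p.length := by simp at hidx; omega
        subst hidx'
        rw [getD_append_len]
        exact List.mem_append_right _ (by simp)
    · -- queue' = [] → p' = []
      intro h
      simp at h
    · -- last of queue' bounds everything
      intro _ t ht
      rw [List.getLastD_concat]
      simp only [List.length_append, List.length_singleton] at ht
      rcases Nat.lt_or_ge t p.length with hlt | hge
      · rw [getD_append_lt _ _ _ _ hlt]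
        exact le_of_lt (hp_all_gt t hlt)
      · have : t = p.length := by omega
        subst this
        rw [getD_append_len]
    · -- queue' = [] → now = 0
      intro h
      simp at h
    · -- now < len queue'
      intro _
      by_cases hq : queue = []
      · subst hq
        have h0 : now = 0 := hnow0 rfl
        simp [h0]
      · have h1 : now < queue.length := hnowlt hq
        simp only [List.length_append, List.length_singleton]
        omega
    · -- upper bound
      intro t j gp
      obtain ⟨htj, hj, hle⟩ := gp
      simp only [List.length_append, List.length_singleton] at hj
      rcases Nat.lt_or_ge j p.length with hjlt | hjge
      · have hgp : GoodPair p t j := by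
          refine ⟨htj, hjlt, ?_⟩
          rwa [getD_append_lt _ _ _ _ (by omega), getD_append_lt _ _ _ _ hjlt] at hle
        exact hub t j hgp
      · have hj' : j = p.length := by omega
        subst hj'
        rcases Nat.lt_or_ge t p.length with htlt | htge
        · rw [getD_append_lt _ _ _ _ htlt, getD_append_len] at hle
          exact absurd hle (not_le.2 (hp_all_gt t htlt))
        · have : t = p.length := by omega
          subst this
          omega
    · -- attained
      rcases hat with h0 | ⟨t, j, ⟨htj, hj, hle⟩, he⟩
      · exact Or.inl h0
      · refine Or.inr ⟨t, j, ⟨htj, by simp; omega, ?_⟩, he⟩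
        rwa [getD_append_lt _ _ _ _ (by omega), getD_append_lt _ _ _ _ hj]
    · -- pointer bound
      intro _
      by_cases hq : queue = []
      · have hp : p = [] := hqnil hq
        have h0 : now = 0 := hnow0 hq
        have hres0 : res = 0 := Wspec_nil (by rw [hp] at hub hat; exact ⟨hr0, hub, hat⟩)
        subst hq hp
        rw [h0, hres0]
        simp
      · have hlt := hnowlt hq
        rw [getD_append_lt _ _ _ _ hlt]
        have := hD hq
        simp only [List.length_append, List.length_singleton]
        push_cast
        omega
  · -- NON-APPEND: the queue is non-empty and x ≥ its minimum (the last entry)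
    push_neg at hbr
    obtain ⟨hqne, hxtop⟩ := hbr
    have hnow := hnowlt hqne
    have hlen_pos : 0 < queue.length := List.length_pos_iff.2 hqne
    -- m = first queue position whose height is ≤ x
    have hex : ∃ k, k < queue.length ∧ (queue.getD k (0,0)).1 ≤ x := by
      refine ⟨queue.length - 1, by omega, ?_⟩
      rw [← getLastD_eq_getD queue (0,0) hqne]
      exact hxtop
    set m := Nat.find hex with hm_def
    obtain ⟨hm_lt, hm_le⟩ := Nat.find_spec hex
    have hpre : ∀ k, k < m → x < (queue.getD k (0,0)).1 := by
      intro k hk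
      have := Nat.find_min hex hk
      push_neg at this
      exact lt_of_not_ge (fun hge => absurd (this (by omega)) (not_lt.2 hge))
    have hsuf : ∀ k, m ≤ k → k < queue.length → (queue.getD k (0,0)).1 ≤ x := by
      intro k hmk hk
      rcases Nat.eq_or_lt_of_le hmk with rfl | hlt
      · exact hm_le
      · exact le_of_lt (lt_of_lt_of_le (qrel_getD queue hpw m k hlt hk).1 hm_le)
    -- the index stored at position m is the least t with p[t] ≤ x
    have hmin_idx : ∀ t, t < (queue.getD m (0,0)).2 → t < p.length → x < p.getD t 0 := by
      intro t htm htp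
      by_contra hnot
      push_neg at hnot
      have hex2 : ∃ s, s < p.length ∧ p.getD s 0 ≤ x := ⟨t, htp, hnot⟩
      set t1 := Nat.find hex2 with ht1_def
      obtain ⟨ht1_lt, ht1_le⟩ := Nat.find_spec hex2
      have ht1_min : ∀ s, s < t1 → x < p.getD s 0 := by
        intro s hs
        have := Nat.find_min hex2 hs
        push_neg at this
        exact lt_of_not_ge (fun hge => absurd (this (by omega)) (not_lt.2 hge))
      have ht1t : t1 ≤ t := Nat.find_min' hex2 ⟨htp, hnot⟩
      have hcond : ∀ s, s < t1 → p.getD t1 0 < p.getD s 0 := by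
        intro s hs
        exact lt_of_le_of_lt ht1_le (ht1_min s hs)
      have hmem := hcomp t1 ht1_lt hcond
      obtain ⟨k, hk, hkeq⟩ := List.getElem_of_mem hmem
      have hkD : queue.getD k (0,0) = (p.getD t1 0, t1) := by
        rw [List.getD_eq_getElem _ _ hk]; exact hkeq
      have hkm : m ≤ k := by
        by_contra hkm
        push_neg at hkm
        have := hpre k hkm
        rw [hkD] at this
        exact absurd ht1_le (not_le.2 this)
      rcases Nat.eq_or_lt_of_le hkm with rfl | hlt
      · rw [hkD] at htm
        have h6 : t < t1 := htm
        omega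
      · have h5 := (qrel_getD queue hpw m k hlt hk).2
        rw [hkD] at h5
        have h6 : (queue.getD m (0,0)).2 < t1 := h5
        omega
    -- facts about the entry at m
    have hem_mem : queue.getD m (0,0) ∈ queue := getD_mem _ _ _ hm_lt
    obtain ⟨hem_lt, hem_val, hem_pm⟩ := hent _ hem_mem
    -- the forward loop
    have hn1_lt : fwdLoop res (p.length : Int) queue now < queue.length :=
      fwd_lt_len _ _ _ _ hnow
    have hn1_bound : res + (((queue.getD (fwdLoop res (p.length : Int) queue now) (0,0)).2 : Nat) : Int) ≤ (p.length : Int) :=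
      fwd_bound _ _ _ _ (hD hqne)
    have hn1_stop := fwd_stop res (p.length : Int) queue now
    set n1 := fwdLoop res (p.length : Int) queue now with hn1_def
    -- the invariant parts that do not depend on the branch
    have hQ' : QInv (p ++ [x]) queue := by
      refine ⟨hpw, ?_, ?_, fun h => absurd h hqne, ?_⟩
      · intro e he
        obtain ⟨h1, h2, h3⟩ := hent e he
        refine ⟨by simp; omega, ?_, ?_⟩
        · rw [getD_append_lt _ _ _ _ h1]; exact h2
        · intro t ht
          rw [getD_append_lt _ _ _ _ (by omega)]
          exact h3 t ht
      · intro idx hidx hcond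
        rcases Nat.lt_or_ge idx p.length with hlt | hge
        · have hcond' : ∀ t, t < idx → p.getD idx 0 < p.getD t 0 := by
            intro t ht
            have := hcond t ht
            rwa [getD_append_lt _ _ _ _ hlt, getD_append_lt _ _ _ _ (by omega)] at this
          rw [getD_append_lt _ _ _ _ hlt]
          exact hcomp idx hlt hcond'
        · have hidx' : idx = p.length := by simp at hidx; omega
          subst hidx'
          exfalso
          obtain ⟨hl1, hl2, _⟩ := hent _ (getLastD_mem queue (0,0) hqne)
          have := hcond (queue.getLastD (0,0)).2 hl1
          rw [getD_append_len, getD_append_lt _ _ _ _ hl1, hl2] at this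
          exact absurd hxtop (not_le.2 this)
      · intro _ t ht
        simp only [List.length_append, List.length_singleton] at ht
        rcases Nat.lt_or_ge t p.length with hlt | hge
        · rw [getD_append_lt _ _ _ _ hlt]
          exact hlast hqne t hlt
        · have : t = p.length := by omega
          subst this
          rw [getD_append_len]
          exact hxtop
    -- upper bound on ramps ending at the new index, phrased via idx_m
    have hub_new : ∀ t, t ≤ p.length →
        (p ++ [x]).getD t 0 ≤ x → ((queue.getD m (0,0)).2 : Int) ≤ (t : Int) := by
      intro t htle hle
      rcases Nat.lt_or_ge t p.length with htlt | htge
      · rw [getD_append_lt _ _ _ _ htlt] at hle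
        by_contra hc
        push_neg at hc
        have : t < (queue.getD m (0,0)).2 := by exact_mod_cast hc
        exact absurd hle (not_le.2 (hmin_idx t this htlt))
      · have : t = p.length := by omega
        subst this
        have : ((queue.getD m (0,0)).2 : Nat) < p.length := hem_lt
        push_cast
        omega
    by_cases hcase : m ≤ n1
    · -- the backward loop lands exactly on m and the update fires
      have hn2 : bwdLoop x queue n1 = m :=
        bwd_eq_of_ge x queue m n1 hm_lt hn1_lt hcase hsuf hpre
      have hcond : x ≥ (queue.getD m (0,0)).1 := hm_le
      have hstep : stepA (res, now, queue) p.length x =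
          (((p.length : Nat) : Int) - (((queue.getD m (0,0)).2 : Nat) : Int), m, queue) := by
        simp only [stepA]
        rw [if_neg ?hneg, hn2, if_pos hcond]
        case hneg =>
          rintro (h | h)
          · exact hqne h
          · exact absurd h (not_lt.2 hxtop)
      rw [hstep]
      have hidxm_le_n1 : ((queue.getD m (0,0)).2 : Nat) ≤ ((queue.getD n1 (0,0)).2 : Nat) := by
        rcases Nat.eq_or_lt_of_le hcase with heq | hlt
        · rw [heq]
        · exact le_of_lt (qrel_getD queue hpw m n1 hlt hn1_lt).2
      have hres_le : res ≤ ((p.length : Nat) : Int) - (((queue.getD m (0,0)).2 : Nat) : Int) := by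
        push_cast at hn1_bound ⊢
        omega
      refine ⟨hQ', fun h => absurd h hqne, fun _ => hm_lt, ⟨?_, ?_, ?_⟩, ?_⟩
      · -- 0 ≤ res'
        have := hem_lt
        push_cast
        omega
      · -- upper bound
        intro t j gp
        obtain ⟨htj, hj, hle⟩ := gp
        simp only [List.length_append, List.length_singleton] at hj
        rcases Nat.lt_or_ge j p.length with hjlt | hjge
        · have hgp : GoodPair p t j := by
            refine ⟨htj, hjlt, ?_⟩
            rwa [getD_append_lt _ _ _ _ (by omega), getD_append_lt _ _ _ _ hjlt] at hle
          exact le_trans (hub t j hgp) hres_le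
        · have hj' : j = p.length := by omega
          subst hj'
          rw [getD_append_len] at hle
          have := hub_new t htj hle
          omega
      · -- attained at the new pair
        refine Or.inr ⟨(queue.getD m (0,0)).2, p.length, ⟨le_of_lt hem_lt, by simp, ?_⟩, rfl⟩
        rw [getD_append_lt _ _ _ _ hem_lt, getD_append_len, hem_val]
        exact hm_le
      · -- pointer bound
        intro _
        simp only [List.length_append, List.length_singleton]
        push_cast
        omega
    · -- the pointer stops short of m: no update, res is already large enough
      push_neg at hcase
      have hn2 : bwdLoop x queue n1 = n1 :=
        bwd_eq_self_of_lt x queue m n1 hm_lt hcase hpre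
      have hcond : ¬ x ≥ (queue.getD n1 (0,0)).1 := not_le.2 (hpre n1 hcase)
      have hstep : stepA (res, now, queue) p.length x = (res, n1, queue) := by
        simp only [stepA]
        rw [if_neg ?hneg, hn2, if_neg hcond]
        case hneg =>
          rintro (h | h)
          · exact hqne h
          · exact absurd h (not_lt.2 hxtop)
      rw [hstep]
      -- the forward loop stopped although it had room: position n1+1 already misses res
      have hstop' : ((p.length : Nat) : Int) - (((queue.getD (n1 + 1) (0,0)).2 : Nat) : Int) ≤ res := by
        have hn1m : n1 + 1 ≤ m := hcase
        have hlt : n1 + 1 < queue.length := by omega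
        by_contra hc
        push_neg at hc
        exact hn1_stop ⟨hlt, hc⟩
      have hidx_le : ((queue.getD (n1 + 1) (0,0)).2 : Nat) ≤ ((queue.getD m (0,0)).2 : Nat) := by
        rcases Nat.eq_or_lt_of_le (Nat.succ_le_of_lt hcase) with heq | hlt
        · rw [show n1 + 1 = m from heq]
        · exact le_of_lt (qrel_getD queue hpw (n1+1) m hlt hm_lt).2
      have hkey : ((p.length : Nat) : Int) - (((queue.getD m (0,0)).2 : Nat) : Int) ≤ res := by
        push_cast at hstop' ⊢
        omega
      refine ⟨hQ', fun h => absurd h hqne, fun _ => hn1_lt, ⟨hr0, ?_, ?_⟩, ?_⟩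
      · -- upper bound
        intro t j gp
        obtain ⟨htj, hj, hle⟩ := gp
        simp only [List.length_append, List.length_singleton] at hj
        rcases Nat.lt_or_ge j p.length with hjlt | hjge
        · have hgp : GoodPair p t j := by
            refine ⟨htj, hjlt, ?_⟩
            rwa [getD_append_lt _ _ _ _ (by omega), getD_append_lt _ _ _ _ hjlt] at hle
          exact hub t j hgp
        · have hj' : j = p.length := by omega
          subst hj'
          rw [getD_append_len] at hle
          have := hub_new t htj hle
          omega
      · -- attained (the old witness survives)
        rcases hat with h0 | ⟨t, j, ⟨htj, hj, hle⟩, he⟩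
        · exact Or.inl h0
        · refine Or.inr ⟨t, j, ⟨htj, by simp; omega, ?_⟩, he⟩
          rwa [getD_append_lt _ _ _ _ (by omega), getD_append_lt _ _ _ _ hj]
      · -- pointer bound
        intro _
        simp only [List.length_append, List.length_singleton]
        push_cast at hn1_bound ⊢
        omega

theorem loop_inv (rest p : List Int) (st : Int × Nat × List (Int × Nat))
    (hinv : AInv p st) : AInv (p ++ rest) (loopA st p.length rest) := by
  induction rest generalizing p st with
  | nil => simpa [loopA] using hinv
  | cons x rest ih =>
      have h1 : AInv (p ++ [x]) (stepA st p.length x) := by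
        obtain ⟨res, now, queue⟩ := st
        exact step_inv p x res now queue hinv
      have h2 := ih (p ++ [x]) (stepA st p.length x) h1
      simpa [loopA, List.append_assoc] using h2

theorem base_inv : AInv [] (0, 0, []) := by
  refine ⟨⟨by simp, by simp, by simp, by simp, by simp⟩, by simp, by simp, ⟨le_refl 0, ?_, Or.inl rfl⟩, by simp⟩
  intro t j gp
  obtain ⟨_, hj, _⟩ := gp
  simp at hj

theorem A_Wspec (h : List Int) : Wspec h (max_height2 h) := by
  have := loop_inv h [] (0, 0, []) base_inv
  simpa [max_height2] using this.2.2.2.1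

-- ===== VERDICT (by name: the statement is the Claim_ definition above) =====
theorem max_height2_spec : Claim_equal_max_height2 := by
  intro heights _
  unfold Spec_max_height2
  exact Wspec_unique (A_Wspec heights) (B_Wspec heights)
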